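-- pv_equiv track=rewrite | github.com/waveboys/Leetcode | DTI.py | divide1
-- ===== SOURCE A (Python) =====
-- def divide1(dividend: int, divisor: int) -> int:
--     # edge case overflow
--     if dividend == -2147483648 and divisor == -1:
--         return 2147483647
--
--     if dividend == 0:
--         return 0
--
--     if divisor == 1:
--         return dividend
--
--     sign = 1
--     if (dividend < 0) ^ (divisor < 0):
--         sign = -1
--
--     v = abs(dividend)
--     s = abs(divisor)
--
--     so_far = 0
--     quot = 0
--     # find quotient bitwise starting from highest bit
--     for i in range(31, -1, -1):
--         if so_far + (s << i) <= v:
--             so_far += (s << i)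
--             quot |= (1 << i)
--
--     if sign == -1:
--         return -quot
--     else:
--         return quot
-- ===== SOURCE B (Python) =====
-- def divide1(dividend: int, divisor: int) -> int:
--     # edge case overflow (LeetCode 32-bit clamp)
--     if dividend == -2147483648 and divisor == -1:
--         return 2147483647
--
--     negative = (dividend < 0) != (divisor < 0)
--     v = abs(dividend)
--     s = abs(divisor)
--
--     quot = 0
--     # repeatedly subtract the largest doubled multiple of s
--     while v >= s:
--         temp, m = s, 1
--         while (temp << 1) <= v:
--             temp <<= 1
--             m <<= 1
--         v -= temp
--         quot += m
--
--     return -quot if negative else quot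
-- ===== Notes on version B (the rewrite author's own statement) =====
-- stated objective: alternative
-- what changed: Replaces the fixed 32-iteration high-to-low bit scan that accumulates so_far with a doubling-subtraction loop that shrinks the remaining dividend by the largest shifted multiple of the divisor each round.
-- outside the precondition, e.g. on divide1(7, 0): A returns 4294967295, B does not finish within the time limit
import Mathlib
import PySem

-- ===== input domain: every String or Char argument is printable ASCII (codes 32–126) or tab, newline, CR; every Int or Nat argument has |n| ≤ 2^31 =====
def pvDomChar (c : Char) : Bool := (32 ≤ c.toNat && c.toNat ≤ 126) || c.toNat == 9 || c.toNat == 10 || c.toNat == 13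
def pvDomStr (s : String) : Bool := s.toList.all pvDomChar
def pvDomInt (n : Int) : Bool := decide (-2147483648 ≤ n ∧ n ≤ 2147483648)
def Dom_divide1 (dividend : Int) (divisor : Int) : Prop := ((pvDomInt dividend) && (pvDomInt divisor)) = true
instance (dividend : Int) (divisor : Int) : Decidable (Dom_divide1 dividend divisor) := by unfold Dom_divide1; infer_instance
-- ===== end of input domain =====

-- B replaces A's fixed 32-iteration high-to-low bit scan (accumulating so_far) with a
-- doubling-subtraction loop on the remaining dividend; equal return values on Pre_ (divisor ≠ 0).

-- ===== PORT A =====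
-- one step of A's `for i in range(31, -1, -1)` body; `s << i` = s * 2^i and `1 << i` = 2^i
-- (exact, i ≥ 0 on this range), `quot |= …` = Int.lor.
def aStep (v s : Int) (p : Int × Int) (i : Int) : Int × Int :=
  if p.1 + s * 2 ^ i.toNat ≤ v then (p.1 + s * 2 ^ i.toNat, Int.lor p.2 (2 ^ i.toNat)) else p

def divide1 (dividend : Int) (divisor : Int) : Int :=
  if dividend = -2147483648 ∧ divisor = -1 then 2147483647
  else if dividend = 0 then 0
  else if divisor = 1 then dividend
  else
    let sign : Int := if (decide (dividend < 0)).xor (decide (divisor < 0)) then -1 else 1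
    let v := |dividend|
    let s := |divisor|
    let r := (PySem.List.pyRange 31 (-1) (-1)).foldl (aStep v s) (0, 0)
    if sign = -1 then -r.2 else r.2

-- ===== PORT B =====
-- inner `while (temp << 1) <= v: temp <<= 1; m <<= 1`; the fuel argument is only a
-- termination guard (v.toNat + 1 doubling steps always suffice, since temp ≥ 1 doubles
-- while temp * 2 ≤ v), so the recursion is structural and evaluable
def bFind (fuel : Nat) (v temp m : Int) : Int × Int :=
  match fuel with
  | 0 => (temp, m)
  | f + 1 => if temp * 2 ≤ v then bFind f v (temp * 2) (m * 2) else (temp, m)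

-- outer `while v >= s:` loop; fuel is again only a termination guard (each round removes
-- at least s ≥ 1 from v on every input Pre_ admits, so v.toNat + 1 rounds suffice)
def bLoop (fuel : Nat) (s v quot : Int) : Int :=
  match fuel with
  | 0 => quot
  | f + 1 =>
    if s ≤ v then
      let tm := bFind (v.toNat + 1) v s 1
      bLoop f s (v - tm.1) (quot + tm.2)
    else quot

def divide1_alt (dividend : Int) (divisor : Int) : Int :=
  if dividend = -2147483648 ∧ divisor = -1 then 2147483647
  else
    let negative := (decide (dividend < 0)) ≠ (decide (divisor < 0))
    let v := |dividend|
    let s := |divisor|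
    let quot := bLoop (v.toNat + 1) s v 0
    if negative then -quot else quot

-- ===== PRECONDITION & SPEC =====
-- Pre_ excludes divisor = 0, on which A's fixed 32-bit scan accidentally returns ±4294967295
-- while B's subtraction loop does not terminate.
def Pre_divide1 (dividend : Int) (divisor : Int) : Prop := divisor ≠ 0
instance (dividend : Int) (divisor : Int) : Decidable (Pre_divide1 dividend divisor) := by unfold Pre_divide1; infer_instance
def pvWitness_divide1 : Int × Int := (7, 2)

def Spec_divide1 (dividend : Int) (divisor : Int) (out : Int) : Prop := out = divide1_alt dividend divisor
instance (dividend : Int) (divisor : Int) (out : Int) : Decidable (Spec_divide1 dividend divisor out) := by unfold Spec_divide1; infer_instance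

-- ===== CLAIM (what is proved, stated in full; the proofs are below) =====
def Claim_equal_divide1 : Prop := ∀ (dividend : Int) (divisor : Int), Dom_divide1 dividend divisor → Pre_divide1 dividend divisor → Spec_divide1 dividend divisor (divide1 dividend divisor)

-- ===== LEMMAS AND PROOFS =====

-- `x | y` on these nonnegative values is plain addition: q is a multiple of 2^(n+1)
lemma nat_lor_pow (k n : Nat) : (2 ^ (n+1) * k) ||| 2 ^ n = 2 ^ (n+1) * k + 2 ^ n := by
  apply Nat.eq_of_testBit_eq
  intro j
  rw [Nat.testBit_lor, Nat.testBit_two_pow_mul_add k (b := 2 ^ n)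
    (by exact Nat.pow_lt_pow_right (by norm_num) (by omega)) j]
  rw [mul_comm, Nat.testBit_mul_two_pow, Nat.testBit_two_pow]
  by_cases h : j < n + 1
  · have hn : ¬ (n + 1 ≤ j) := by omega
    simp only [if_pos h, hn, decide_false, Bool.false_and, Bool.false_or]
  · have h1 : n + 1 ≤ j := by omega
    have h2 : ¬ (n = j) := by omega
    simp [h, h1, h2]

lemma int_lor_pow (q' : Int) (n : Nat) (h : 0 ≤ q') :
    Int.lor (2 ^ (n+1) * q') (2 ^ n) = 2 ^ (n+1) * q' + 2 ^ n := by
  obtain ⟨k, rfl⟩ := Int.eq_ofNat_of_zero_le h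
  have : (2 ^ (n+1) * (k : Int)) = ((2 ^ (n+1) * k : Nat) : Int) := by push_cast; ring
  rw [this, show ((2:Int) ^ n) = ((2 ^ n : Nat) : Int) by push_cast; ring]
  change ((_ ||| _ : Nat) : Int) = _
  rw [nat_lor_pow]
  push_cast; ring

-- A's loop over the remaining bits [n-1, …, 0], with the restoring-division invariant
lemma aLoop_spec (n : Nat) (v s so q : Int) (hs : 0 < s) (hv : 0 ≤ v)
    (hso : so = s * q) (hq : q = 2 ^ n * (v / (s * 2 ^ n))) :
    (((List.range n).reverse.map Int.ofNat).foldl (aStep v s) (so, q)).2 = v / s := by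
  induction n generalizing so q with
  | zero => simpa using hq
  | succ n ih =>
    rw [List.range_succ, List.reverse_append, List.map_append, List.foldl_append]
    simp only [List.reverse_singleton, List.map_cons, List.map_nil, List.foldl_cons, List.foldl_nil]
    set q' : Int := v / (s * 2 ^ (n + 1)) with hq'
    have hq'0 : 0 ≤ q' := Int.ediv_nonneg hv (by positivity)
    have hqn : v / (s * 2 ^ n) / 2 = q' := by
      rw [Int.ediv_ediv_of_nonneg (by positivity : (0:Int) ≤ s * 2 ^ n), hq']
      norm_num [mul_assoc, pow_succ]
    have hrw : s * q + s * 2 ^ n = (2 * q' + 1) * (s * 2 ^ n) := by rw [hq]; ring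
    have hle : (2 * q' + 1 ≤ v / (s * 2 ^ n)) ↔ (2 * q' + 1) * (s * 2 ^ n) ≤ v :=
      Int.le_ediv_iff_mul_le (by positivity)
    simp only [aStep, Int.ofNat_eq_natCast, Int.toNat_natCast]
    by_cases hc : so + s * 2 ^ n ≤ v
    · rw [if_pos hc]
      have hx : v / (s * 2 ^ n) = 2 * q' + 1 := by
        have h1 : 2 * q' + 1 ≤ v / (s * 2 ^ n) := hle.mpr (by rw [← hrw, ← hso]; exact hc)
        omega
      apply ih
      · rw [hso, hq, int_lor_pow _ _ hq'0]; ring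
      · rw [hq, int_lor_pow _ _ hq'0, hx]; ring
    · rw [if_neg hc]
      have hx : v / (s * 2 ^ n) = 2 * q' := by
        have h1 : ¬ (2 * q' + 1 ≤ v / (s * 2 ^ n)) := fun hh => hc (by
          rw [hso, hrw]; exact hle.mp hh)
        omega
      exact ih so q hso (by rw [hq, hx]; ring)

lemma bFind_fst_ge (fuel : Nat) (v temp m : Int) (h : 0 < temp) :
    temp ≤ (bFind fuel v temp m).1 := by
  induction fuel generalizing temp m with
  | zero => exact le_refl temp
  | succ f ih =>
    rw [bFind]
    split
    · exact le_trans (by omega) (ih (temp * 2) (m * 2) (by omega))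
    · exact le_refl temp

lemma bFind_fst_eq (fuel : Nat) (v temp m s : Int) (h : temp = s * m) :
    (bFind fuel v temp m).1 = s * (bFind fuel v temp m).2 := by
  induction fuel generalizing temp m with
  | zero => simpa using h
  | succ f ih =>
    rw [bFind]
    split
    · exact ih (temp * 2) (m * 2) (by rw [h]; ring)
    · simpa using h

lemma bFind_fst_le (fuel : Nat) (v temp m : Int) (h : temp ≤ v) :
    (bFind fuel v temp m).1 ≤ v := by
  induction fuel generalizing temp m with
  | zero => simpa using h
  | succ f ih =>
    rw [bFind]
    split
    · next hg => exact ih (temp * 2) (m * 2) hg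
    · simpa using h

lemma bLoop_spec (fuel : Nat) (s v quot : Int) (hs : 0 < s) (hv : 0 ≤ v)
    (hf : v.toNat < fuel) : bLoop fuel s v quot = quot + v / s := by
  induction fuel generalizing v quot with
  | zero => omega
  | succ f ih =>
    rw [bLoop]
    split
    · next h =>
      have h1 := bFind_fst_eq (v.toNat + 1) v s 1 s (by ring)
      have h2 := bFind_fst_ge (v.toNat + 1) v s 1 hs
      have h3 := bFind_fst_le (v.toNat + 1) v s 1 h
      rw [ih (v - (bFind (v.toNat + 1) v s 1).1) _ (by omega) (by omega)]
      have he : v - (bFind (v.toNat + 1) v s 1).1 =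
          v + (-(bFind (v.toNat + 1) v s 1).2) * s := by rw [h1]; ring
      rw [he, Int.add_mul_ediv_right _ _ (by omega)]
      ring
    · next h =>
      rw [Int.ediv_eq_zero_of_lt hv (by omega)]
      ring

lemma pyRange_31 : PySem.List.pyRange 31 (-1) (-1) = (List.range 32).reverse.map Int.ofNat := by
  decide

-- ===== VERDICT (by name: the statement is the Claim_ definition above) =====
theorem divide1_spec : Claim_equal_divide1 := by
  intro dd dv hdom hpre
  unfold Spec_divide1 divide1 divide1_alt
  by_cases hof : dd = -2147483648 ∧ dv = -1
  · simp [hof]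
  rw [if_neg hof, if_neg hof]
  simp only []
  have hdv0 : dv ≠ 0 := hpre
  have hs : 0 < |dv| := abs_pos.mpr hdv0
  have hv : 0 ≤ |dd| := abs_nonneg dd
  have hB : bLoop (|dd|.toNat + 1) |dv| |dd| 0 = |dd| / |dv| := by
    rw [bLoop_spec _ _ _ _ hs hv (by omega)]; ring
  have hdd : -2147483648 ≤ dd ∧ dd ≤ 2147483648 := by
    have := hdom
    unfold Dom_divide1 pvDomInt at this
    simp only [Bool.and_eq_true, decide_eq_true_eq] at this
    exact this.1
  by_cases h0 : dd = 0
  · rw [if_pos h0]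
    subst h0
    simp only [abs_zero] at hB ⊢
    rw [Int.zero_ediv] at hB
    rw [hB]
    by_cases hneg : (decide ((0:Int) < 0)) ≠ (decide (dv < 0)) <;> simp
  rw [if_neg h0]
  have hA : (((PySem.List.pyRange 31 (-1) (-1)).foldl (aStep |dd| |dv|) (0, 0)).2) = |dd| / |dv| := by
    rw [pyRange_31]
    apply aLoop_spec 32 |dd| |dv| 0 0 hs hv (by ring)
    have hlt : |dd| < |dv| * 2 ^ 32 := by
      have h1 : |dd| ≤ 2147483648 := abs_le.mpr hdd
      nlinarith
    rw [Int.ediv_eq_zero_of_lt hv hlt]; ring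
  by_cases h1 : dv = 1
  · rw [if_pos h1]
    subst h1
    rw [abs_one, Int.ediv_one] at hB
    simp only [abs_one]
    rw [hB]
    by_cases hddneg : dd < 0
    · have hcnd : (decide (dd < 0)) ≠ (decide ((1:Int) < 0)) := by simp [hddneg]
      rw [if_pos hcnd]
      rcases abs_cases dd with ⟨he, _⟩ | ⟨he, _⟩ <;> omega
    · have hcnd : ¬ ((decide (dd < 0)) ≠ (decide ((1:Int) < 0))) := by simp [hddneg]
      rw [if_neg hcnd]
      rcases abs_cases dd with ⟨he, _⟩ | ⟨he, _⟩ <;> omega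
  rw [if_neg h1]
  simp only [hA, hB]
  by_cases hddneg : dd < 0 <;> by_cases hdvneg : dv < 0 <;>
    simp [hddneg, hdvneg, Bool.xor]
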